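-- pv_equiv track=rewrite | github.com/typedev/DSSketch | dsl-converter.py | detect_pattern_from_glyphs
-- ===== SOURCE A (Python) =====
-- from typing import Dict, List, Tuple, Optional, Any, Set
--
-- def detect_pattern_from_glyphs(glyph_names: List[str]) -> Optional[str]:
--     """Try to detect a wildcard pattern from a list of glyph names"""
--     if len(glyph_names) < 2:
--         return None
--
--     # Try to find common prefix
--     common_prefix = ""
--     for i in range(min(len(name) for name in glyph_names)):
--         char = glyph_names[0][i]
--         if all(name[i] == char for name in glyph_names):
--             common_prefix += char
--         else:
--             break
--
--     # Try to find common suffix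
--     common_suffix = ""
--     min_len = min(len(name) for name in glyph_names)
--     for i in range(1, min_len + 1):
--         char = glyph_names[0][-i]
--         if all(name[-i] == char for name in glyph_names):
--             common_suffix = char + common_suffix
--         else:
--             break
--
--     # Generate pattern if we have significant commonality
--     if len(common_prefix) >= 3:  # At least 3 chars for prefix
--         # Check if all names actually start with this prefix
--         if all(name.startswith(common_prefix) for name in glyph_names):
--             return f"{common_prefix}*"
--
--     if len(common_suffix) >= 3:  # At least 3 chars for suffix
--         # Check if all names actually end with this suffix
--         if all(name.endswith(common_suffix) for name in glyph_names):
--             return f"*{common_suffix}"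
--
--     return None
-- ===== SOURCE B (Python) =====
-- def detect_pattern_from_glyphs(glyph_names):
--     """Try to detect a wildcard pattern from a list of glyph names.
--
--     Find-extremes strategy: the common prefix of all names equals the common
--     prefix of the lexicographic min and max; the common suffix likewise via
--     the reversed names.  Same thresholds and prefix-before-suffix priority."""
--     if len(glyph_names) < 2:
--         return None
--
--     lo, hi = min(glyph_names), max(glyph_names)
--     k = 0
--     while k < len(lo) and k < len(hi) and lo[k] == hi[k]:
--         k += 1
--     common_prefix = lo[:k]
--
--     rev = [name[::-1] for name in glyph_names]
--     lo2, hi2 = min(rev), max(rev)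
--     k = 0
--     while k < len(lo2) and k < len(hi2) and lo2[k] == hi2[k]:
--         k += 1
--     common_suffix = lo2[:k][::-1]
--
--     if len(common_prefix) >= 3:
--         return common_prefix + "*"
--     if len(common_suffix) >= 3:
--         return "*" + common_suffix
--     return None
-- ===== Notes on version B (the rewrite author's own statement) =====
-- stated objective: alternative
-- what changed: Replaces the per-position scan over all names (and the redundant startswith/endswith re-checks) by comparing only the lexicographic min and max of the list (and of the reversed names for the suffix), which share exactly the common prefix of all names.
import Mathlib
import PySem

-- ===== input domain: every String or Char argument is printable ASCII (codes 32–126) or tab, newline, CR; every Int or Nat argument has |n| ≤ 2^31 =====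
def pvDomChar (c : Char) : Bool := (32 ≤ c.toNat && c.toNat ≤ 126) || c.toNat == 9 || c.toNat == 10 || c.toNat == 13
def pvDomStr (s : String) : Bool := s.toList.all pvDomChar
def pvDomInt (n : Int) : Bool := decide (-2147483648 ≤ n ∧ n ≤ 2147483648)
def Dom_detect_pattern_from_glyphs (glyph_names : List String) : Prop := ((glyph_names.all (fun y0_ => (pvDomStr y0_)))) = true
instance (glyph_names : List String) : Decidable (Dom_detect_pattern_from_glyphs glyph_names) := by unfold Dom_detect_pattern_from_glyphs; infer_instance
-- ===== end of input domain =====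

-- B detects the pattern by comparing only the lexicographic min/max of the names
-- (and of the reversed names for the suffix) instead of scanning all names per position: alternative algorithm, same result.


-- ===== PORT A =====
-- the prefix loop: for i in range(minlen): char = first[i]; if all(n[i]==char): prefix += char else break
-- (index i is provably in range: i < minlen ≤ len(n) for every name n, so getD's default is never used)
def pvPrefScan (names : List (List Char)) (first : List Char) (limit : Nat) (i : Nat) : List Char :=
  if i < limit then
    let c := first.getD i ' '
    if names.all (fun n => n.getD i ' ' == c) then c :: pvPrefScan names first limit (i + 1) else []
  else []
termination_by limit - i

-- the suffix loop: for i in range(1, min_len+1): char = first[-i]; if all(n[-i]==char): suffix = char + suffix else break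
-- (Python's n[-i] is n[len(n)-i], in range since 1 ≤ i ≤ min_len ≤ len(n))
def pvSufScan (names : List (List Char)) (first : List Char) (limit : Nat) (i : Nat) (acc : List Char) : List Char :=
  if i ≤ limit then
    let c := first.getD (first.length - i) ' '
    if names.all (fun n => n.getD (n.length - i) ' ' == c) then pvSufScan names first limit (i + 1) (c :: acc) else acc
  else acc
termination_by limit + 1 - i

-- the trailing 'if len(common_suffix) >= 3: … return None' part, reached from both branches of the prefix check
def pvSufBranch (names : List (List Char)) (cs : List Char) : Option String :=
  if 3 ≤ cs.length then
    if names.all (fun n => cs.isSuffixOf n) then some (String.ofList ('*' :: cs)) else none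
  else none

def detect_pattern_from_glyphs (glyph_names : List String) : Option String :=
  if glyph_names.length < 2 then none
  else
    let names := glyph_names.map String.toList
    -- min(len(name) for name in glyph_names); Python recomputes the identical min for the suffix loop
    match PySem.List.min? (names.map List.length) (fun x => x) with
    | none => none  -- unreachable: glyph_names has ≥ 2 elements
    | some minlen =>
      let first := names.headD []          -- glyph_names[0]
      let cp := pvPrefScan names first minlen 0
      let cs := pvSufScan names first minlen 1 []
      if 3 ≤ cp.length then
        if names.all (fun n => cp.isPrefixOf n) then some (String.ofList (cp ++ ['*']))
        else pvSufBranch names cs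
      else pvSufBranch names cs

-- ===== PORT B =====
-- B's while loop: shared leading chars of two strings
def pvCp2 : List Char → List Char → List Char
  | a :: as, b :: bs => if a == b then a :: pvCp2 as bs else []
  | _, _ => []

def detect_pattern_from_glyphs_alt (glyph_names : List String) : Option String :=
  if glyph_names.length < 2 then none
  else
    match PySem.List.min? glyph_names (fun x => x), PySem.List.max? glyph_names (fun x => x) with
    | some lo, some hi =>
      let cp := pvCp2 lo.toList hi.toList
      let rev := glyph_names.map (fun s => String.ofList s.toList.reverse)   -- name[::-1]
      match PySem.List.min? rev (fun x => x), PySem.List.max? rev (fun x => x) with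
      | some lo2, some hi2 =>
        let cs := (pvCp2 lo2.toList hi2.toList).reverse
        if 3 ≤ cp.length then some (String.ofList (cp ++ ['*']))
        else if 3 ≤ cs.length then some (String.ofList ('*' :: cs)) else none
      | _, _ => none   -- unreachable: rev is nonempty
    | _, _ => none     -- unreachable: glyph_names has ≥ 2 elements

-- ===== PRECONDITION & SPEC =====
def Spec_detect_pattern_from_glyphs (glyph_names : List String) (out : Option String) : Prop := out = detect_pattern_from_glyphs_alt glyph_names
instance (glyph_names : List String) (out : Option String) : Decidable (Spec_detect_pattern_from_glyphs glyph_names out) := by unfold Spec_detect_pattern_from_glyphs; infer_instance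

-- ===== CLAIM (what is proved, stated in full; the proofs are below) =====
def Claim_equal_detect_pattern_from_glyphs : Prop := ∀ (glyph_names : List String), Dom_detect_pattern_from_glyphs glyph_names → Spec_detect_pattern_from_glyphs glyph_names (detect_pattern_from_glyphs glyph_names)

-- ===== LEMMAS AND PROOFS =====

/-- `p` is the longest common prefix of all members of `L`. -/
def IsLCP (p : List Char) (L : List (List Char)) : Prop :=
  (∀ l ∈ L, p <+: l) ∧ ∀ q, (∀ l ∈ L, q <+: l) → q <+: p

theorem isLCP_unique {p p' : List Char} {L : List (List Char)} (h : IsLCP p L) (h' : IsLCP p' L) : p = p' :=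
  ((h'.2 p h.1).sublist).antisymm ((h.2 p' h'.1).sublist)

theorem pvCp2_greatest : ∀ (q a b : List Char), q <+: a → q <+: b → q <+: pvCp2 a b := by
  intro q
  induction q with
  | nil => intro a b _ _; exact List.nil_prefix
  | cons d q' ih =>
    intro a b ha hb
    cases a with
    | nil => exact absurd ha (by simp)
    | cons x as =>
      cases b with
      | nil => exact absurd hb (by simp)
      | cons y bs =>
        rw [List.cons_prefix_cons] at ha hb
        have hxy : x = y := by rw [← ha.1]; exact hb.1
        simp only [pvCp2, hxy, beq_self_eq_true, if_true]
        rw [List.cons_prefix_cons]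
        exact ⟨hb.1, ih as bs ha.2 hb.2⟩

/-- Any list lexicographically between `lo` and `hi` starts with their common prefix. -/
theorem pvCp2_between : ∀ (lo hi s : List Char),
    ¬ List.Lex (· < ·) s lo → ¬ List.Lex (· < ·) hi s → pvCp2 lo hi <+: s := by
  intro lo
  induction lo with
  | nil => intro hi s _ _; cases hi <;> simp [pvCp2]
  | cons a as ih =>
    intro hi s h1 h2
    cases hi with
    | nil => simp [pvCp2]
    | cons b bs =>
      by_cases hab : a = b
      · subst hab
        cases s with
        | nil => exact absurd (List.Lex.nil) h1
        | cons d s' =>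
          have hda : ¬ d < a := fun h => h1 (List.Lex.rel h)
          have had : ¬ a < d := fun h => h2 (List.Lex.rel h)
          have hd : d = a := le_antisymm (not_lt.mp had) (not_lt.mp hda)
          subst hd
          have h1' : ¬ List.Lex (· < ·) s' as := fun h => h1 (List.Lex.cons h)
          have h2' : ¬ List.Lex (· < ·) bs s' := fun h => h2 (List.Lex.cons h)
          simp only [pvCp2, beq_self_eq_true, if_true]
          rw [List.cons_prefix_cons]
          exact ⟨rfl, ih bs s' h1' h2'⟩
      · simp [pvCp2, hab]

theorem string_le_not_lex {s t : String} (h : s ≤ t) : ¬ List.Lex (· < ·) t.toList s.toList := by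
  intro hlex
  exact h (String.lt_iff_toList_lt.mpr ((List.lt_iff_lex_lt t.toList s.toList).mpr hlex))

/-- The A-side prefix scan computes the longest common prefix (from position `i` on). -/
theorem pvPrefScan_spec (names : List (List Char)) (first : List Char) (hf : first ∈ names)
    (minlen : Nat) (hmin : ∀ n ∈ names, minlen ≤ n.length) (hatt : ∃ n ∈ names, n.length = minlen) :
    ∀ k i, minlen - i = k → i ≤ minlen →
      (∀ n ∈ names, pvPrefScan names first minlen i <+: n.drop i) ∧
      (∀ q, (∀ n ∈ names, q <+: n.drop i) → q <+: pvPrefScan names first minlen i) := by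
  intro k
  induction k with
  | zero =>
    intro i hk hi
    have hieq : i = minlen := by omega
    subst hieq
    rw [pvPrefScan]
    simp only [lt_irrefl, if_false]
    constructor
    · intro n _; exact List.nil_prefix
    · intro q hq
      obtain ⟨n, hn, hlenn⟩ := hatt
      have hqn : q <+: n.drop i := hq n hn
      rw [List.drop_eq_nil_of_le (by omega)] at hqn
      rw [List.prefix_nil] at hqn
      simp [hqn]
  | succ k ih =>
    intro i hk hi
    have hilt : i < minlen := by omega
    have hifirst : i < first.length := lt_of_lt_of_le hilt (hmin first hf)
    rw [pvPrefScan]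
    simp only [hilt, if_true]
    by_cases hall : names.all (fun n => n.getD i ' ' == first.getD i ' ') = true
    · simp only [hall, if_true]
      obtain ⟨hpre, hgre⟩ := ih (i + 1) (by omega) (by omega)
      have hchar : ∀ n ∈ names, n.getD i ' ' = first.getD i ' ' := by
        intro n hn
        exact eq_of_beq ((List.all_eq_true.mp hall) n hn)
      constructor
      · intro n hn
        have hin : i < n.length := lt_of_lt_of_le hilt (hmin n hn)
        rw [List.drop_eq_getElem_cons hin, List.cons_prefix_cons]
        refine ⟨?_, hpre n hn⟩
        rw [← List.getD_eq_getElem n ' ' hin, hchar n hn]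
      · intro q hq
        cases q with
        | nil => exact List.nil_prefix
        | cons d q' =>
          have hqf := hq first hf
          rw [List.drop_eq_getElem_cons hifirst, List.cons_prefix_cons] at hqf
          rw [List.cons_prefix_cons]
          refine ⟨by rw [hqf.1, List.getD_eq_getElem first ' ' hifirst], ?_⟩
          refine hgre q' ?_
          intro n hn
          have hin : i < n.length := lt_of_lt_of_le hilt (hmin n hn)
          have hqn := hq n hn
          rw [List.drop_eq_getElem_cons hin, List.cons_prefix_cons] at hqn
          exact hqn.2
    · simp only [hall]
      constructor
      · intro n _; exact List.nil_prefix
      · intro q hq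
        cases q with
        | nil => exact List.nil_prefix
        | cons d q' =>
          exfalso
          rw [List.all_eq_true] at hall
          push Not at hall
          obtain ⟨n, hn, hne⟩ := hall
          have hin : i < n.length := lt_of_lt_of_le hilt (hmin n hn)
          have hqn := hq n hn
          have hqf := hq first hf
          rw [List.drop_eq_getElem_cons hin, List.cons_prefix_cons] at hqn
          rw [List.drop_eq_getElem_cons hifirst, List.cons_prefix_cons] at hqf
          apply hne
          rw [beq_iff_eq, List.getD_eq_getElem n ' ' hin, List.getD_eq_getElem first ' ' hifirst,
            ← hqn.1, ← hqf.1]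

/-- The A-side suffix scan is the reversed prefix scan over the reversed names. -/
theorem pvSufScan_eq (names : List (List Char)) (first : List Char)
    (minlen : Nat) (hmin : ∀ n ∈ names, minlen ≤ n.length) (hf : first ∈ names) :
    ∀ k i acc, minlen + 1 - i = k → 1 ≤ i →
      pvSufScan names first minlen i acc =
        (pvPrefScan (names.map List.reverse) first.reverse minlen (i - 1)).reverse ++ acc := by
  intro k
  induction k with
  | zero =>
    intro i acc hk h1
    rw [pvSufScan, pvPrefScan]
    have hx : ¬ i ≤ minlen := by omega
    have h2 : ¬ (i - 1 < minlen) := by omega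
    simp [hx, h2]
  | succ k ih =>
    intro i acc hk h1
    have hile : i ≤ minlen := by omega
    have hflen : minlen ≤ first.length := hmin first hf
    have hif : i - 1 < first.length := by omega
    have hrevlen : i - 1 < first.reverse.length := by simpa using hif
    rw [pvSufScan, pvPrefScan]
    have h2 : i - 1 < minlen := by omega
    simp only [hile, if_true, h2, if_true]
    -- the scanned character is the same on both sides
    have hcfirst : first.reverse.getD (i - 1) ' ' = first.getD (first.length - i) ' ' := by
      rw [List.getD_eq_getElem _ ' ' hrevlen,
        List.getD_eq_getElem _ ' ' (show first.length - i < first.length by omega),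
        List.getElem_reverse]
      congr 1
      omega
    have hpt : ∀ n ∈ names, (n.reverse.getD (i - 1) ' ' == first.reverse.getD (i - 1) ' ')
        = (n.getD (n.length - i) ' ' == first.getD (first.length - i) ' ') := by
      intro n hn
      have hin : i - 1 < n.length := by have := hmin n hn; omega
      have hinr : i - 1 < n.reverse.length := by simpa using hin
      rw [hcfirst, List.getD_eq_getElem _ ' ' hinr,
        List.getD_eq_getElem n ' ' (show n.length - i < n.length by omega), List.getElem_reverse]
      have hidx : n.length - 1 - (i - 1) = n.length - i := by omega
      simp only [hidx]
    have hcond : (names.map List.reverse).all (fun n => n.getD (i - 1) ' ' == first.reverse.getD (i - 1) ' ')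
        = names.all (fun n => n.getD (n.length - i) ' ' == first.getD (first.length - i) ' ') := by
      rw [Bool.eq_iff_iff, List.all_map, List.all_eq_true, List.all_eq_true]
      constructor
      · intro h n hn
        rw [← hpt n hn]
        exact h n hn
      · intro h n hn
        have := h n hn
        simp only [Function.comp_apply]
        rw [hpt n hn]
        exact this
    rw [hcond]
    by_cases hall : names.all (fun n => n.getD (n.length - i) ' ' == first.getD (first.length - i) ' ') = true
    · simp only [hall, if_true]
      rw [ih (i + 1) _ (by omega) (by omega)]
      have hstep : i + 1 - 1 = (i - 1) + 1 := by omega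
      rw [hstep, hcfirst]
      simp
    · rw [if_neg hall, if_neg hall]
      simp

theorem headD_mem {l : List (List Char)} (h : l ≠ []) : l.headD [] ∈ l := by
  cases l with
  | nil => exact absurd rfl h
  | cons x xs => simp

-- ===== VERDICT (by name: the statement is the Claim_ definition above) =====
theorem detect_pattern_from_glyphs_spec : Claim_equal_detect_pattern_from_glyphs := by
  intro glyph_names _
  unfold Spec_detect_pattern_from_glyphs
  by_cases hlen : glyph_names.length < 2
  · simp [detect_pattern_from_glyphs, detect_pattern_from_glyphs_alt, hlen]
  · have hne : glyph_names ≠ [] := by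
      intro h; subst h; simp at hlen
    set names := glyph_names.map String.toList with hnames
    have hnamesne : names ≠ [] := by simpa [hnames] using hne
    -- min length exists
    obtain ⟨minlen, hminlen⟩ : ∃ m, PySem.List.min? (names.map List.length) (fun x => x) = some m := by
      cases hm : PySem.List.min? (names.map List.length) (fun x => x) with
      | none => rw [PySem.List.min?_eq_none_iff] at hm; simp [hnamesne] at hm
      | some m => exact ⟨m, rfl⟩
    have hmin : ∀ n ∈ names, minlen ≤ n.length := by
      intro n hn
      exact PySem.List.min?_isMin hminlen n.length (List.mem_map_of_mem hn)
    have hatt : ∃ n ∈ names, n.length = minlen := by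
      have hmem := PySem.List.min?_mem hminlen
      obtain ⟨n, hn, he⟩ := List.mem_map.mp hmem
      exact ⟨n, hn, he⟩
    -- lo / hi exist
    obtain ⟨lo, hlo⟩ : ∃ x, PySem.List.min? glyph_names (fun x => x) = some x := by
      cases hm : PySem.List.min? glyph_names (fun x => x) with
      | none => rw [PySem.List.min?_eq_none_iff] at hm; exact absurd hm hne
      | some m => exact ⟨m, rfl⟩
    obtain ⟨hi, hhi⟩ : ∃ x, PySem.List.max? glyph_names (fun x => x) = some x := by
      cases hm : PySem.List.max? glyph_names (fun x => x) with
      | none => rw [PySem.List.max?_eq_none_iff] at hm; exact absurd hm hne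
      | some m => exact ⟨m, rfl⟩
    set rev := glyph_names.map (fun s => String.ofList s.toList.reverse) with hrev
    have hrevne : rev ≠ [] := by simpa [hrev] using hne
    obtain ⟨lo2, hlo2⟩ : ∃ x, PySem.List.min? rev (fun x => x) = some x := by
      cases hm : PySem.List.min? rev (fun x => x) with
      | none => rw [PySem.List.min?_eq_none_iff] at hm; exact absurd hm hrevne
      | some m => exact ⟨m, rfl⟩
    obtain ⟨hi2, hhi2⟩ : ∃ x, PySem.List.max? rev (fun x => x) = some x := by
      cases hm : PySem.List.max? rev (fun x => x) with
      | none => rw [PySem.List.max?_eq_none_iff] at hm; exact absurd hm hrevne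
      | some m => exact ⟨m, rfl⟩
    -- the first name
    set first := names.headD [] with hfirst
    have hfmem : first ∈ names := headD_mem hnamesne
    -- A's prefix is the LCP of names
    have hAcp : IsLCP (pvPrefScan names first minlen 0) names := by
      obtain ⟨h1, h2⟩ := pvPrefScan_spec names first hfmem minlen hmin hatt minlen 0 (by omega) (by omega)
      exact ⟨by simpa using h1, by simpa using h2⟩
    -- B's prefix is the LCP of names
    have hBcp : IsLCP (pvCp2 lo.toList hi.toList) names := by
      constructor
      · intro l hl
        obtain ⟨s, hs, he⟩ := List.mem_map.mp hl
        subst he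
        have hlos : lo ≤ s := PySem.List.min?_isMin hlo s hs
        have hshi : s ≤ hi := PySem.List.max?_isMax hhi s hs
        exact pvCp2_between lo.toList hi.toList s.toList (string_le_not_lex hlos) (string_le_not_lex hshi)
      · intro q hq
        have hlom : lo.toList ∈ names := List.mem_map_of_mem (PySem.List.min?_mem hlo)
        have hhim : hi.toList ∈ names := List.mem_map_of_mem (PySem.List.max?_mem hhi)
        exact pvCp2_greatest q lo.toList hi.toList (hq _ hlom) (hq _ hhim)
    have hcpeq : pvPrefScan names first minlen 0 = pvCp2 lo.toList hi.toList := isLCP_unique hAcp hBcp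
    -- reversed names
    set rnames := names.map List.reverse with hrnames
    have hrnameseq : rev.map String.toList = rnames := by
      simp only [hrev, hrnames, hnames, List.map_map]
      apply List.map_congr_left
      intro a _
      simp [String.toList_ofList]
    have hrmin : ∀ n ∈ rnames, minlen ≤ n.length := by
      intro n hn
      obtain ⟨m, hm, he⟩ := List.mem_map.mp hn
      subst he; simpa using hmin m hm
    have hratt : ∃ n ∈ rnames, n.length = minlen := by
      obtain ⟨n, hn, he⟩ := hatt
      exact ⟨n.reverse, List.mem_map_of_mem hn, by simpa using he⟩
    have hrfmem : first.reverse ∈ rnames := List.mem_map_of_mem hfmem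
    -- A's suffix is the reversed LCP of the reversed names
    have hAcs : pvSufScan names first minlen 1 [] =
        (pvPrefScan rnames first.reverse minlen 0).reverse := by
      rw [pvSufScan_eq names first minlen hmin hfmem minlen 1 [] (by omega) (by omega)]
      simp [hrnames]
    have hArev : IsLCP (pvPrefScan rnames first.reverse minlen 0) rnames := by
      obtain ⟨h1, h2⟩ := pvPrefScan_spec rnames first.reverse hrfmem minlen hrmin hratt minlen 0 (by omega) (by omega)
      exact ⟨by simpa using h1, by simpa using h2⟩
    -- B's suffix core is the LCP of the reversed names
    have hBrev : IsLCP (pvCp2 lo2.toList hi2.toList) rnames := by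
      constructor
      · intro l hl
        rw [← hrnameseq] at hl
        obtain ⟨s, hs, he⟩ := List.mem_map.mp hl
        subst he
        have hlos : lo2 ≤ s := PySem.List.min?_isMin hlo2 s hs
        have hshi : s ≤ hi2 := PySem.List.max?_isMax hhi2 s hs
        exact pvCp2_between lo2.toList hi2.toList s.toList (string_le_not_lex hlos) (string_le_not_lex hshi)
      · intro q hq
        have hlom : lo2.toList ∈ rnames := by
          rw [← hrnameseq]; exact List.mem_map_of_mem (PySem.List.min?_mem hlo2)
        have hhim : hi2.toList ∈ rnames := by
          rw [← hrnameseq]; exact List.mem_map_of_mem (PySem.List.max?_mem hhi2)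
        exact pvCp2_greatest q lo2.toList hi2.toList (hq _ hlom) (hq _ hhim)
    have hcseq : pvPrefScan rnames first.reverse minlen 0 = pvCp2 lo2.toList hi2.toList :=
      isLCP_unique hArev hBrev
    -- A's redundant startswith check is always true
    have hstarts : names.all (fun n => (pvPrefScan names first minlen 0).isPrefixOf n) = true := by
      rw [List.all_eq_true]
      intro n hn
      exact List.isPrefixOf_iff_prefix.mpr (hAcp.1 n hn)
    -- A's redundant endswith check is always true
    have hends : names.all (fun n => (pvSufScan names first minlen 1 []).isSuffixOf n) = true := by
      rw [List.all_eq_true]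
      intro n hn
      rw [List.isSuffixOf_iff_suffix, hAcs]
      have hp : pvPrefScan rnames first.reverse minlen 0 <+: n.reverse :=
        hArev.1 n.reverse (List.mem_map_of_mem hn)
      rw [← List.reverse_prefix]
      simpa using hp
    have hstarts' : (names.all fun n => (pvCp2 lo.toList hi.toList).isPrefixOf n) = true := by
      rw [← hcpeq]; exact hstarts
    have hends' : (names.all fun n => (pvCp2 lo2.toList hi2.toList).reverse.isSuffixOf n) = true := by
      rw [← hcseq, ← hAcs]; exact hends
    -- now unfold both sides and line up the branches
    rw [detect_pattern_from_glyphs, detect_pattern_from_glyphs_alt]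
    simp only [hlen, if_false, ← hnames, hminlen, ← hfirst, ← hrev, hlo, hhi, hlo2, hhi2]
    simp only [pvSufBranch, hcpeq, hAcs, hcseq]
    simp only [hstarts', hends', if_true]
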